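-- pv_equiv track=rewrite | github.com/daniel-reich/turbo-robot | hZ4HzhboCJ5dDiNve_12.py | special_reverse_string
-- ===== SOURCE A (Python) =====
-- def special_reverse_string(txt):
--     l = [i.casefold() for i in txt if i != ' '][::-1]
--     for i, val in enumerate(txt):
--         if val == ' ':
--             l.insert(i, val)
--     return ''.join(
--       k.swapcase() if not i.islower() and i.isalpha()
--       else k
--       for i, k in zip(txt, l))
-- ===== SOURCE B (Python) =====
-- def special_reverse_string(txt):
--     rev = iter([c.lower() for c in reversed(txt) if c != ' '])
--     out = []
--     for c in txt:
--         if c == ' ':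
--             out.append(' ')
--         else:
--             n = next(rev)
--             out.append(n.upper() if c.isalpha() and not c.islower() else n)
--     return ''.join(out)
-- ===== Notes on version B (the rewrite author's own statement) =====
-- stated objective: alternative
-- what changed: Replaces A's three-stage pipeline (build reversed casefolded list, repeatedly list.insert a space at each space index, then a zip/swapcase pass) with a single pass over txt that keeps spaces and pulls successive chars from a prebuilt reversed lowercased sequence, uppercasing where the original char is a non-lowercase letter.
import Mathlib
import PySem

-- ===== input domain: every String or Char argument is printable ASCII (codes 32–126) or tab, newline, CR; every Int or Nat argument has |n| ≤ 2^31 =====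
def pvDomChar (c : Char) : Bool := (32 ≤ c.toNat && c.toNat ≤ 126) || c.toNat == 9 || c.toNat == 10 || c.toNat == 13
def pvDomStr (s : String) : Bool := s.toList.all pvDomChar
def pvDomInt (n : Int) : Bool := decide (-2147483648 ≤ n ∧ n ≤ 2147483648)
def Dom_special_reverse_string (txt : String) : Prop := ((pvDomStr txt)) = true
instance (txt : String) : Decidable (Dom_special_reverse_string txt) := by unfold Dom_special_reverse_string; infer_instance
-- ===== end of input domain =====

-- B replaces A's insert-into-list reconstruction by one pass over txt consuming a
-- prebuilt reversed lowercased sequence (objective: alternative single-pass structure).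

-- ===== PORT A =====
-- str.casefold() on a single char: equals lower on the ASCII domain (exact there)
def pvCasefoldChar (c : Char) : Char := PySem.Chars.lowerChar c
-- str.swapcase() on a single char: exact on ASCII
def pvSwapcaseChar (c : Char) : Char :=
  if PySem.Chars.islower c then PySem.Chars.upperChar c
  else if PySem.Chars.isupper c then PySem.Chars.lowerChar c
  else c

def special_reverse_string (txt : String) : String :=
  let l0 := ((txt.toList.filter (fun i => i ≠ ' ')).map pvCasefoldChar).reverse
  let l := (PySem.List.enumerate txt.toList).foldl
    (fun l p => if p.2 = ' ' then PySem.List.insert l p.1 p.2 else l) l0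
  String.mk ((txt.toList.zip l).map (fun p =>
    if !PySem.Chars.islower p.1 && PySem.Chars.isalpha p.1 then pvSwapcaseChar p.2 else p.2))

-- ===== PORT B =====
-- the for-loop of Source B: walk txt, keep spaces, else consume the next char of rev
def pvBLoop : List Char → List Char → List Char
  | [], _ => []
  | c :: cs, rev =>
    if c = ' ' then ' ' :: pvBLoop cs rev
    else
      match rev with
      | [] => []  -- unreachable: rev holds exactly one char per non-space char of txt
      | n :: rest =>
        (if PySem.Chars.isalpha c && !PySem.Chars.islower c then PySem.Chars.upperChar n
         else n) :: pvBLoop cs rest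

def special_reverse_string_alt (txt : String) : String :=
  let rev := (txt.toList.reverse.filter (fun c => c ≠ ' ')).map PySem.Chars.lowerChar
  String.mk (pvBLoop txt.toList rev)

-- ===== PRECONDITION & SPEC =====
def Spec_special_reverse_string (txt : String) (out : String) : Prop := out = special_reverse_string_alt txt
instance (txt : String) (out : String) : Decidable (Spec_special_reverse_string txt out) := by unfold Spec_special_reverse_string; infer_instance

-- ===== CLAIM (what is proved, stated in full; the proofs are below) =====
def Claim_equal_special_reverse_string : Prop := ∀ (txt : String), Dom_special_reverse_string txt → Spec_special_reverse_string txt (special_reverse_string txt)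

-- ===== LEMMAS AND PROOFS =====

-- what A's insert loop builds: spaces at the space positions of txt, the other slots taken from r in order
def pvMerge : List Char → List Char → List Char
  | [], r => r
  | c :: cs, r =>
    if c = ' ' then ' ' :: pvMerge cs r
    else match r with
      | [] => []
      | n :: rest => n :: pvMerge cs rest

lemma pv_toNat_ofNat_small (n : Nat) (h : n ≤ 122) : (Char.ofNat n).toNat = n := by
  unfold Char.ofNat
  split
  · simp [Char.toNat, Char.ofNatAux]
  · rename_i hn; exfalso; apply hn; unfold Nat.isValidChar; omega

lemma pv_isupper_lowerChar (c : Char) : PySem.Chars.isupper (PySem.Chars.lowerChar c) = false := by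
  unfold PySem.Chars.lowerChar PySem.Chars.isupper
  by_cases h : (decide ('A' ≤ c) && decide (c ≤ 'Z')) = true
  · simp only [h, if_true]
    simp only [Bool.and_eq_true, decide_eq_true_eq, Char.le_def, UInt32.le_iff_toNat_le] at h
    have h1 : (65:Nat) ≤ c.toNat := h.1
    have h2 : c.toNat ≤ 90 := h.2
    have ht : (Char.ofNat (c.toNat + 32)).toNat = c.toNat + 32 := by
      apply pv_toNat_ofNat_small; omega
    simp only [Bool.and_eq_false_iff, decide_eq_false_iff_not, Char.le_def, UInt32.le_iff_toNat_le]
    right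
    show ¬ (Char.ofNat (c.toNat + 32)).toNat ≤ (90:Nat)
    omega
  · simp [h]

lemma pv_swap_eq_upper (n : Char) (h : PySem.Chars.isupper n = false) :
    pvSwapcaseChar n = PySem.Chars.upperChar n := by
  unfold pvSwapcaseChar PySem.Chars.upperChar
  by_cases hl : PySem.Chars.islower n = true <;> simp [hl, h]

-- A's insert loop, run on a list of the right length, is pvMerge
lemma pv_fold_ins (txt : List Char) : ∀ (acc r : List Char),
    (txt.filter (fun i => i ≠ ' ')).length ≤ r.length →
    (PySem.List.enumerate txt (acc.length : Int)).foldl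
       (fun l p => if p.2 = ' ' then PySem.List.insert l p.1 p.2 else l) (acc ++ r)
     = acc ++ pvMerge txt r := by
  induction txt with
  | nil => intro acc r h; simp [PySem.List.enumerate_nil, pvMerge]
  | cons c cs ih =>
    intro acc r h
    rw [PySem.List.enumerate_cons]
    by_cases hc : c = ' '
    · subst hc
      simp only [List.foldl_cons, reduceIte]
      have hins : PySem.List.insert (acc ++ r) ((acc.length : Nat) : Int) ' ' = (acc ++ [' ']) ++ r := by
        rw [PySem.List.insert_natCast _ _ _ (by simp)]
        simp
      rw [hins]
      have hs : (acc.length : Int) + 1 = (((acc ++ [' ']).length : Nat) : Int) := by simp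
      rw [hs, ih (acc ++ [' ']) r (by simpa using h)]
      simp [pvMerge]
    · have h' : (List.filter (fun i => decide (i ≠ ' ')) cs).length + 1 ≤ r.length := by
        simpa [List.filter_cons, hc] using h
      obtain ⟨n, rest, rfl⟩ : ∃ n rest, r = n :: rest := by
        cases r with
        | nil => simp at h'
        | cons n rest => exact ⟨n, rest, rfl⟩
      simp only [List.foldl_cons, if_neg hc]
      have hsplit : acc ++ n :: rest = (acc ++ [n]) ++ rest := by simp
      rw [hsplit]
      have hs : (acc.length : Int) + 1 = (((acc ++ [n]).length : Nat) : Int) := by simp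
      rw [hs, ih (acc ++ [n]) rest (by simp at h' ⊢; omega)]
      simp [pvMerge, hc]

-- A's final zip/swapcase pass over the merged list is B's single loop
lemma pv_zip_merge (txt : List Char) : ∀ (r : List Char),
    (txt.filter (fun i => i ≠ ' ')).length ≤ r.length →
    (∀ n ∈ r, PySem.Chars.isupper n = false) →
    (txt.zip (pvMerge txt r)).map (fun p =>
        if !PySem.Chars.islower p.1 && PySem.Chars.isalpha p.1 then pvSwapcaseChar p.2 else p.2)
      = pvBLoop txt r := by
  induction txt with
  | nil => intro r h hu; simp [pvBLoop]
  | cons c cs ih =>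
    intro r h hu
    by_cases hc : c = ' '
    · subst hc
      have hm : pvMerge (' ' :: cs) r = ' ' :: pvMerge cs r := by simp [pvMerge]
      rw [hm]
      simp only [List.zip_cons_cons, List.map_cons]
      rw [ih r (by simpa using h) hu]
      have hsp : (if !PySem.Chars.islower ' ' && PySem.Chars.isalpha ' ' then pvSwapcaseChar ' ' else ' ') = ' ' := by decide
      rw [hsp]
      simp [pvBLoop]
    · have h' : (List.filter (fun i => decide (i ≠ ' ')) cs).length + 1 ≤ r.length := by
        simpa [List.filter_cons, hc] using h
      obtain ⟨n, rest, rfl⟩ : ∃ n rest, r = n :: rest := by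
        cases r with
        | nil => simp at h'
        | cons n rest => exact ⟨n, rest, rfl⟩
      have hm : pvMerge (c :: cs) (n :: rest) = n :: pvMerge cs rest := by simp [pvMerge, hc]
      rw [hm]
      simp only [List.zip_cons_cons, List.map_cons]
      rw [ih rest (by simp at h' ⊢; omega) (fun m hm => hu m (List.mem_cons_of_mem _ hm))]
      have hun : PySem.Chars.isupper n = false := hu n (List.mem_cons_self ..)
      have hhd : (if !PySem.Chars.islower c && PySem.Chars.isalpha c then pvSwapcaseChar n else n)
          = (if PySem.Chars.isalpha c && !PySem.Chars.islower c then PySem.Chars.upperChar n else n) := by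
        cases ha : PySem.Chars.isalpha c <;> cases hl : PySem.Chars.islower c <;>
          simp [pv_swap_eq_upper n hun]
      rw [hhd]
      simp [pvBLoop, hc]

-- ===== VERDICT (by name: the statement is the Claim_ definition above) =====
theorem special_reverse_string_spec : Claim_equal_special_reverse_string := by
  intro txt _
  unfold Spec_special_reverse_string special_reverse_string special_reverse_string_alt
  set r0 := ((txt.toList.filter (fun i => i ≠ ' ')).map pvCasefoldChar).reverse with hr0
  have hlen : (txt.toList.filter (fun i => i ≠ ' ')).length ≤ r0.length := by
    simp [hr0]
  have hfold : (PySem.List.enumerate txt.toList).foldl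
      (fun l p => if p.2 = ' ' then PySem.List.insert l p.1 p.2 else l) r0
      = pvMerge txt.toList r0 := by
    have := pv_fold_ins txt.toList [] r0 hlen
    simpa using this
  have hup : ∀ n ∈ r0, PySem.Chars.isupper n = false := by
    intro n hn
    simp only [hr0, List.mem_reverse, List.mem_map] at hn
    obtain ⟨x, _, rfl⟩ := hn
    exact pv_isupper_lowerChar x
  have hrB : (txt.toList.reverse.filter (fun c => c ≠ ' ')).map PySem.Chars.lowerChar = r0 := by
    simp [hr0, pvCasefoldChar, List.filter_reverse, List.map_reverse]
  simp only [hfold, hrB]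
  rw [pv_zip_merge txt.toList r0 hlen hup]
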